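-- pv_equiv track=rewrite | github.com/YolanyYwy/benchcc | src/tau2/continual_learning/curriculum/interleaved.py | _round_robin_interleave
-- ===== SOURCE A (Python) =====
-- from typing import Any, Dict, List, Optional
--
-- def _round_robin_interleave(
--
--     domain_tasks: Dict[str, List[str]]
-- ) -> List[str]:
--     """Round-robin interleaving across domains."""
--     curriculum = []
--     domains = sorted(domain_tasks.keys())
--     indices = {d: 0 for d in domains}
--
--     while True:
--         added = False
--         for domain in domains:
--             if indices[domain] < len(domain_tasks[domain]):
--                 curriculum.append(domain_tasks[domain][indices[domain]])
--                 indices[domain] += 1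
--                 added = True
--         if not added:
--             break
--
--     return curriculum
-- ===== SOURCE B (Python) =====
-- def _round_robin_interleave(domain_tasks):
--     """Round-robin interleaving across domains (decorate-sort-undecorate)."""
--     decorated = [
--         (i, rank, task)
--         for rank, domain in enumerate(sorted(domain_tasks))
--         for i, task in enumerate(domain_tasks[domain])
--     ]
--     decorated.sort(key=lambda e: (e[0], e[1]))
--     return [task for _, _, task in decorated]
-- ===== Notes on version B (the rewrite author's own statement) =====
-- stated objective: alternative
-- what changed: Replaces A's repeated full-rescan round loop with mutable per-domain indices by a loop-free decorate-sort-undecorate: tag every task with (position-in-its-domain, domain-rank), sort once by that key, and project the tasks out.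
import Mathlib
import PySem

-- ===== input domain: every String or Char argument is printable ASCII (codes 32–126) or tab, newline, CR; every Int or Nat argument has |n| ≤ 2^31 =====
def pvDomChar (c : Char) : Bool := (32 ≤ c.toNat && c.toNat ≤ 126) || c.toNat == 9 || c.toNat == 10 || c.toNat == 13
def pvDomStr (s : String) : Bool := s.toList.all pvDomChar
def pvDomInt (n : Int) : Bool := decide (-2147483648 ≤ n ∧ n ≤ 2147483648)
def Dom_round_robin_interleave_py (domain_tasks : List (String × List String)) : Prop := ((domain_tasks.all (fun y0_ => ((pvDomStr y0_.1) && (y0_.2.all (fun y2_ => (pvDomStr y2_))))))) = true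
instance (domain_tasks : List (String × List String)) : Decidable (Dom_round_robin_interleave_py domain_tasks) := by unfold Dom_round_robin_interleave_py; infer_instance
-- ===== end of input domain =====

-- B replaces A's multi-round rescanning loop by a loop-free decorate-sort-undecorate:
-- each task is tagged (position-in-its-domain, domain-rank), sorted once by that key,
-- and projected out (objective: alternative algorithm, same result).

-- ===== PORT A =====
-- one step of the 'for domain in domains' body; state = (indices, curriculum, added)
def pvPassA (d : PySem.Dict String (List String))
    (st : PySem.Dict String Int × List String × Bool) (domain : String) :
    PySem.Dict String Int × List String × Bool :=
  let ind := st.1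
  let i := ind.getD domain 0
  let l := d.getD domain []
  if i < (l.length : Int) then
    (ind.insert domain (i + 1), st.2.1 ++ [PySem.List.pyGetD l i ""], true)
  else st

-- the 'while True' loop; fuel = total number of tasks + 1, provably enough rounds
def pvLoopA (d : PySem.Dict String (List String)) (domains : List String) :
    Nat → PySem.Dict String Int → List String → List String
  | 0, _, cur => cur
  | fuel + 1, ind, cur =>
    let st := domains.foldl (pvPassA d) (ind, cur, false)
    if st.2.2 then pvLoopA d domains fuel st.1 st.2.1 else st.2.1

def round_robin_interleave_py (domain_tasks : List (String × List String)) : List String :=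
  let d := PySem.Dict.ofList domain_tasks
  let domains := PySem.List.sorted d.keys (fun x => x) false
  let indices := domains.foldl (fun acc dd => acc.insert dd (0 : Int)) PySem.Dict.empty
  let fuel := (domains.map (fun dd => (d.getD dd []).length)).sum + 1
  pvLoopA d domains fuel indices []

-- ===== PORT B =====
def round_robin_interleave_py_alt (domain_tasks : List (String × List String)) : List String :=
  let d := PySem.Dict.ofList domain_tasks
  -- decorated = [(i, rank, task) for rank, domain in enumerate(sorted(domain_tasks)) for i, task in enumerate(domain_tasks[domain])]
  let decorated := (PySem.List.enumerate (PySem.List.sorted d.keys (fun x => x) false)).flatMap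
    (fun rd => (PySem.List.enumerate (d.getD rd.2 [])).map (fun it => (it.1, rd.1, it.2)))
  -- decorated.sort(key=lambda e: (e[0], e[1]))  — Python's lexicographic tuple order = Prod.Lex
  let sortedDec := PySem.List.sorted decorated (fun e => (toLex (e.1, e.2.1) : Lex (Int × Int))) false
  -- [task for _, _, task in decorated]
  sortedDec.map (fun e => e.2.2)

-- ===== PRECONDITION & SPEC =====
def Spec_round_robin_interleave_py (domain_tasks : List (String × List String)) (out : List String) : Prop := out = round_robin_interleave_py_alt domain_tasks
instance (domain_tasks : List (String × List String)) (out : List String) : Decidable (Spec_round_robin_interleave_py domain_tasks out) := by unfold Spec_round_robin_interleave_py; infer_instance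

-- ===== CLAIM (what is proved, stated in full; the proofs are below) =====
def Claim_equal_round_robin_interleave_py : Prop := ∀ (domain_tasks : List (String × List String)), Dom_round_robin_interleave_py domain_tasks → Spec_round_robin_interleave_py domain_tasks (round_robin_interleave_py domain_tasks)

-- ===== LEMMAS AND PROOFS =====

-- proof-local shorthands: B's decorated list, restated over an arbitrary enumerated
-- association el : List (rank, tasks), and its bucket of round r
def pvDec (el : List (Int × List String)) : List (Int × Int × String) :=
  el.flatMap (fun kl => (PySem.List.enumerate kl.2).map (fun it => (it.1, kl.1, it.2)))

def pvBucket (r : Nat) (el : List (Int × List String)) : List (Int × Int × String) :=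
  el.filterMap (fun kl => (kl.2[r]?).map (fun t => ((r : Int), kl.1, t)))

-- the zero-initialised indices dict answers 0 on every key
theorem pvGetD_init_zero (ds : List String) (dct : PySem.Dict String Int)
    (h : ∀ k, dct.getD k 0 = 0) (k : String) :
    (ds.foldl (fun acc dd => acc.insert dd (0 : Int)) dct).getD k 0 = 0 := by
  induction ds generalizing dct with
  | nil => exact h k
  | cons dd ds ih =>
      refine ih _ (fun k' => ?_)
      rw [PySem.Dict.getD_insert]
      split <;> simp [h]

-- one full pass of A over a nodup suffix of domains, with indices at round r
theorem pvFold_pass (d : PySem.Dict String (List String)) (r : Nat) :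
    ∀ (ds : List String) (ind : PySem.Dict String Int) (cur : List String) (b : Bool),
    ds.Nodup →
    (∀ dd ∈ ds, ind.getD dd 0 = ((min r (d.getD dd []).length : Nat) : Int)) →
    ∃ ind',
      ds.foldl (pvPassA d) (ind, cur, b) =
        (ind',
         cur ++ (ds.filter (fun dd => decide (r < (d.getD dd []).length))).map
                  (fun dd => PySem.List.pyGetD (d.getD dd []) (r : Int) ""),
         (b || ds.any (fun dd => decide (r < (d.getD dd []).length))))
      ∧ (∀ dd ∈ ds, ind'.getD dd 0 = ((min (r + 1) (d.getD dd []).length : Nat) : Int))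
      ∧ (∀ k, k ∉ ds → ind'.getD k 0 = ind.getD k 0) := by
  intro ds
  induction ds with
  | nil => intro ind cur b _ _; exact ⟨ind, by simp, by simp, fun _ _ => rfl⟩
  | cons dd ds ih =>
      intro ind cur b hnd hinv
      have hdd : ind.getD dd 0 = ((min r (d.getD dd []).length : Nat) : Int) :=
        hinv dd (by simp)
      have hndtl : ds.Nodup := (List.nodup_cons.mp hnd).2
      have hddnot : dd ∉ ds := (List.nodup_cons.mp hnd).1
      by_cases hr : r < (d.getD dd []).length
      · -- active domain: index advances, its task is appended
        have hmin : min r (d.getD dd []).length = r := Nat.min_eq_left (Nat.le_of_lt hr)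
        have hlt : ind.getD dd 0 < ((d.getD dd []).length : Int) := by
          rw [hdd, hmin]; exact_mod_cast hr
        obtain ⟨ind', hfold, hinv', hout⟩ :=
          ih (ind.insert dd (ind.getD dd 0 + 1))
            (cur ++ [PySem.List.pyGetD (d.getD dd []) (ind.getD dd 0) ""]) true hndtl
            (fun dd' hdd' => by
              rw [PySem.Dict.getD_insert_of_ne _ _ _ (by intro h; subst h; exact hddnot hdd')]
              exact hinv dd' (List.mem_cons_of_mem _ hdd'))
        have hself : ind'.getD dd 0 = ((min (r + 1) (d.getD dd []).length : Nat) : Int) := by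
          rw [hout dd hddnot, PySem.Dict.getD_insert_self, hdd, hmin]
          have : min (r + 1) (d.getD dd []).length = r + 1 := Nat.min_eq_left hr
          rw [this]; push_cast; ring
        refine ⟨ind', ?_, ?_, ?_⟩
        · rw [List.foldl_cons]
          show ds.foldl (pvPassA d) (pvPassA d (ind, cur, b) dd) = _
          rw [show pvPassA d (ind, cur, b) dd =
              (ind.insert dd (ind.getD dd 0 + 1),
               cur ++ [PySem.List.pyGetD (d.getD dd []) (ind.getD dd 0) ""], true) by
            simp [pvPassA, hlt]]
          rw [hfold]
          simp [hr, hdd, hmin, List.append_assoc]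
        · intro dd' hdd'
          rcases List.mem_cons.mp hdd' with h | h
          · exact h ▸ hself
          · exact hinv' dd' h
        · intro k hk
          rw [hout k (fun h => hk (List.mem_cons_of_mem _ h)),
            PySem.Dict.getD_insert_of_ne _ _ _ (by intro h; subst h; exact hk List.mem_cons_self)]
      · -- exhausted domain: the state is unchanged
        have hmin : min r (d.getD dd []).length = (d.getD dd []).length :=
          Nat.min_eq_right (Nat.le_of_not_lt hr)
        have hnlt : ¬ ind.getD dd 0 < ((d.getD dd []).length : Int) := by
          rw [hdd, hmin]; simp
        obtain ⟨ind', hfold, hinv', hout⟩ := ih ind cur b hndtl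
          (fun dd' hdd' => hinv dd' (List.mem_cons_of_mem _ hdd'))
        have hself : ind'.getD dd 0 = ((min (r + 1) (d.getD dd []).length : Nat) : Int) := by
          rw [hout dd hddnot, hdd, hmin, Nat.min_eq_right (by omega)]
        refine ⟨ind', ?_, ?_, ?_⟩
        · rw [List.foldl_cons]
          show ds.foldl (pvPassA d) (pvPassA d (ind, cur, b) dd) = _
          rw [show pvPassA d (ind, cur, b) dd = (ind, cur, b) by simp [pvPassA, hnlt]]
          rw [hfold]
          simp [hr]
        · intro dd' hdd'
          rcases List.mem_cons.mp hdd' with h | h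
          · exact h ▸ hself
          · exact hinv' dd' h
        · intro k hk
          exact hout k (fun h => hk (List.mem_cons_of_mem _ h))

-- A's loop with fuel rounds left, started at round r, is exactly the next fuel rounds
theorem pvLoopA_closed (d : PySem.Dict String (List String)) (domains : List String)
    (hnd : domains.Nodup) :
    ∀ (fuel r : Nat) (ind : PySem.Dict String Int) (cur : List String),
    (∀ dd ∈ domains, ind.getD dd 0 = ((min r (d.getD dd []).length : Nat) : Int)) →
    pvLoopA d domains fuel ind cur =
      cur ++ (List.range' r fuel).flatMap (fun r' =>
        (domains.filter (fun dd => decide (r' < (d.getD dd []).length))).map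
          (fun dd => PySem.List.pyGetD (d.getD dd []) (r' : Int) "")) := by
  intro fuel
  induction fuel with
  | zero => intro r ind cur _; simp [pvLoopA]
  | succ fuel ih =>
      intro r ind cur hinv
      obtain ⟨ind', hfold, hinv', -⟩ := pvFold_pass d r domains ind cur false hnd hinv
      rw [pvLoopA, hfold]
      simp only [Bool.false_or]
      by_cases hany : domains.any (fun dd => decide (r < (d.getD dd []).length))
      · -- some domain still active: recurse into round r + 1
        rw [if_pos hany, ih (r + 1) ind' _ hinv', List.range'_succ]
        simp [List.append_assoc]
      · -- no domain active at round r: every later round is empty too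
        have hlen : ∀ dd ∈ domains, (d.getD dd []).length ≤ r := by
          intro dd hdd
          by_contra h
          exact hany (List.any_eq_true.mpr ⟨dd, hdd, by simpa using Nat.lt_of_not_le h⟩)
        have hfil : domains.filter (fun dd => decide (r < (d.getD dd []).length)) = [] := by
          rw [List.filter_eq_nil_iff]
          intro dd hdd
          simpa using Nat.not_lt.mpr (hlen dd hdd)
        rw [if_neg (by simp [hany])]
        have hflat : (List.range' r (fuel + 1)).flatMap (fun r' =>
            (domains.filter (fun dd => decide (r' < (d.getD dd []).length))).map
              (fun dd => PySem.List.pyGetD (d.getD dd []) (r' : Int) "")) = [] := by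
          rw [List.flatMap_eq_nil_iff]
          intro r' hr'
          have hrr : r ≤ r' := (List.mem_range'_1.mp hr').1
          have : domains.filter (fun dd => decide (r' < (d.getD dd []).length)) = [] := by
            rw [List.filter_eq_nil_iff]
            intro dd hdd
            simpa using Nat.not_lt.mpr (le_trans (hlen dd hdd) hrr)
          rw [this, List.map_nil]
        rw [hflat, hfil]
        simp

-- the round-r elements of an enumeration: at most one, the r-th
theorem pvFilter_enumerate (l : List String) : ∀ (r : Nat) (s : Int),
    (PySem.List.enumerate l s).filter (fun p => decide (p.1 = s + (r : Int))) =
      ((l[r]?).map (fun t => (s + (r : Int), t))).toList := by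
  induction l with
  | nil => intro r s; simp [PySem.List.enumerate_nil]
  | cons x l ih =>
      intro r s
      rw [PySem.List.enumerate_cons]
      cases r with
      | zero =>
          simp only [Nat.cast_zero, add_zero]
          rw [List.filter_cons_of_pos (by simp)]
          have htl : (PySem.List.enumerate l (s + 1)).filter (fun p => decide (p.1 = s)) = [] := by
            rw [List.filter_eq_nil_iff]
            intro p hp
            obtain ⟨k, hk, rfl⟩ := (PySem.List.mem_enumerate_iff l (s + 1) p).mp hp
            simp
            omega
          rw [htl]
          simp
      | succ r =>
          have hs : s + ((r + 1 : Nat) : Int) = (s + 1) + (r : Int) := by push_cast; ring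
          rw [List.filter_cons_of_neg (by simp; omega)]
          rw [hs, ih r (s + 1)]
          cases h : l[r]? <;> simp [h]

-- B's decorated list filtered to round r is the bucket of round r
theorem pvBucket_eq_filter (r : Nat) : ∀ (el : List (Int × List String)),
    (pvDec el).filter (fun e => decide (e.1 = (r : Int))) = pvBucket r el := by
  intro el
  induction el with
  | nil => simp [pvDec, pvBucket]
  | cons kl el ih =>
      have hsplit : pvDec (kl :: el) =
          (PySem.List.enumerate kl.2).map (fun it => (it.1, kl.1, it.2)) ++ pvDec el := rfl
      have hchunk : ((PySem.List.enumerate kl.2).map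
            (fun it : Int × String => (it.1, kl.1, it.2))).filter
            (fun e => decide (e.1 = (r : Int))) =
          ((kl.2[r]?).map (fun t => ((r : Int), kl.1, t))).toList := by
        rw [List.filter_map]
        have hcomp : ((fun e : Int × Int × String => decide (e.1 = (r : Int))) ∘
            (fun it : Int × String => (it.1, kl.1, it.2))) =
            (fun p : Int × String => decide (p.1 = (0 : Int) + (r : Int))) := by
          funext it; simp
        rw [hcomp, pvFilter_enumerate kl.2 r 0]
        cases kl.2[r]? <;> simp
      rw [hsplit, List.filter_append, ih, hchunk]
      simp only [pvBucket, List.filterMap_cons]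
      cases kl.2[r]? <;> simp

-- bucketing a list whose first components are rounds below R is a permutation of it
theorem pvPerm_buckets (R : Nat) : ∀ (l : List (Int × Int × String)),
    (∀ e ∈ l, ∃ k : Nat, k < R ∧ e.1 = (k : Int)) →
    ((List.range' 0 R).flatMap (fun (r : Nat) =>
      l.filter (fun e => decide (e.1 = (r : Int))))).Perm l := by
  induction R with
  | zero =>
      intro l h
      cases l with
      | nil => simp
      | cons e l => obtain ⟨k, hk, -⟩ := h e (by simp); omega
  | succ R ih =>
      intro l h
      have hconcat : List.range' 0 (R + 1) = List.range' 0 R ++ [R] := by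
        rw [List.range'_concat]; simp
      rw [hconcat, List.flatMap_append]
      simp only [List.flatMap_cons, List.flatMap_nil, List.append_nil]
      have hmap : (List.range' 0 R).flatMap (fun (r : Nat) =>
            l.filter (fun e => decide (e.1 = (r : Int)))) =
          (List.range' 0 R).flatMap (fun (r : Nat) =>
            (l.filter (fun e => !decide (e.1 = (R : Int)))).filter
              (fun e => decide (e.1 = (r : Int)))) := by
        rw [List.flatMap, List.flatMap]
        refine congrArg List.flatten (List.map_congr_left (fun r hr => ?_))
        have hrR : r < R := by simpa using (List.mem_range'_1.mp hr).2
        rw [List.filter_filter]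
        refine (List.filter_congr (fun e _ => ?_)).symm
        by_cases he : e.1 = (r : Int)
        · have : ¬ e.1 = (R : Int) := by
            rw [he]; intro hc
            exact absurd (by exact_mod_cast hc) (by omega)
          simp [he]
          omega
        · simp [he]
      rw [hmap]
      have hIH := ih (l.filter (fun e => !decide (e.1 = (R : Int)))) (by
        intro e he
        obtain ⟨hel, hne⟩ := List.mem_filter.mp he
        obtain ⟨k, hk, hke⟩ := h e hel
        refine ⟨k, ?_, hke⟩
        rcases Nat.lt_succ_iff_lt_or_eq.mp hk with h' | h'
        · exact h'
        · subst h'; rw [hke] at hne; simp at hne)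
      have h1 := hIH.append_right (l.filter (fun e => decide (e.1 = (R : Int))))
      have h2 : ((l.filter (fun e => !decide (e.1 = (R : Int)))) ++
          l.filter (fun e => decide (e.1 = (R : Int)))).Perm
          ((l.filter (fun e => decide (e.1 = (R : Int)))) ++
          l.filter (fun e => !decide (e.1 = (R : Int)))) := List.perm_append_comm
      have h3 := List.filter_append_perm (fun e => decide (e.1 = (R : Int))) l
      exact h1.trans (h2.trans h3)

-- every element of a bucket carries its round as first component
theorem pvMem_bucket_fst (r : Nat) (el : List (Int × List String))
    (e : Int × Int × String) (he : e ∈ pvBucket r el) : e.1 = (r : Int) := by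
  obtain ⟨kl, -, hkl⟩ := List.mem_filterMap.mp he
  cases h : kl.2[r]? with
  | none => rw [h] at hkl; simp at hkl
  | some t => rw [h] at hkl; simp at hkl; rw [← hkl]

-- the concatenated buckets are strictly increasing in the key (round, rank)
theorem pvPairwise_rounds (R : Nat) (el : List (Int × List String))
    (hel : el.Pairwise (fun p q => p.1 < q.1)) :
    ((List.range' 0 R).flatMap (fun r => pvBucket r el)).Pairwise
      (fun a b => (toLex (a.1, a.2.1) : Lex (Int × Int)) < toLex (b.1, b.2.1)) := by
  rw [List.flatMap, List.pairwise_flatten]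
  constructor
  · intro chunk hchunk
    obtain ⟨r, -, rfl⟩ := List.mem_map.mp hchunk
    simp only [pvBucket]
    rw [List.pairwise_filterMap]
    refine hel.imp ?_
    intro p q hpq b hb b' hb'
    cases hp2 : p.2[r]? with
    | none => rw [hp2] at hb; simp at hb
    | some t =>
        cases hq2 : q.2[r]? with
        | none => rw [hq2] at hb'; simp at hb'
        | some t' =>
            rw [hp2] at hb; rw [hq2] at hb'
            simp at hb hb'
            rw [← hb, ← hb']
            rw [Prod.Lex.toLex_lt_toLex]
            exact Or.inr ⟨rfl, hpq⟩
  · have hR : (List.range' 0 R).Pairwise (fun a b => a < b) := List.pairwise_lt_range' 1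
    rw [List.pairwise_map]
    refine hR.imp_of_mem ?_
    intro r r' hr hr' hlt x hx y hy
    rw [Prod.Lex.toLex_lt_toLex]
    left
    rw [pvMem_bucket_fst r el x hx, pvMem_bucket_fst r' el y hy]
    exact_mod_cast hlt

-- projecting the tasks out of a bucket gives A's round-r output
theorem pvMap_thd_bucket (r : Nat) : ∀ (el : List (Int × List String)),
    (pvBucket r el).map (fun e => e.2.2) =
      ((el.map (fun kl => kl.2)).filter (fun l => decide (r < l.length))).map
        (fun l => PySem.List.pyGetD l (r : Int) "") := by
  intro el
  induction el with
  | nil => simp [pvBucket]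
  | cons kl el ih =>
      cases h : kl.2[r]? with
      | none =>
          have hlen : kl.2.length ≤ r := List.getElem?_eq_none_iff.mp h
          have hb : pvBucket r (kl :: el) = pvBucket r el := by
            simp [pvBucket, h]
          rw [hb, List.map_cons,
            List.filter_cons_of_neg (by simpa using Nat.not_lt.mpr hlen), ih]
      | some t =>
          obtain ⟨hlt, hval⟩ := List.getElem?_eq_some_iff.mp h
          have hget : PySem.List.pyGetD kl.2 (r : Int) "" = t := by
            rw [PySem.List.pyGetD_natCast, List.getD_eq_getElem?_getD, h, Option.getD_some]
          have hb : pvBucket r (kl :: el) = ((r : Int), kl.1, t) :: pvBucket r el := by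
            simp [pvBucket, h]
          rw [hb, List.map_cons, List.map_cons,
            List.filter_cons_of_pos (by simpa using hlt), List.map_cons, hget, ih]

-- each list's length is below A's fuel
theorem pvLen_lt_fuel (domains : List String) (g : String → List String)
    (dd : String) (hdd : dd ∈ domains) :
    (g dd).length < (domains.map (fun x => (g x).length)).sum + 1 := by
  have := List.single_le_sum (l := domains.map (fun x => (g x).length))
    (by intro x _; exact Nat.zero_le x) ((g dd).length) (List.mem_map_of_mem hdd)
  omega

-- ===== VERDICT (by name: the statement is the Claim_ definition above) =====
theorem round_robin_interleave_py_spec : Claim_equal_round_robin_interleave_py := by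
  intro domain_tasks _
  unfold Spec_round_robin_interleave_py
  simp only [round_robin_interleave_py, round_robin_interleave_py_alt]
  set d := PySem.Dict.ofList domain_tasks with hd
  set domains := PySem.List.sorted d.keys (fun x => x) false with hdomains
  set R := (domains.map (fun dd => (d.getD dd []).length)).sum + 1 with hR
  set el : List (Int × List String) :=
    (PySem.List.enumerate domains).map (fun p => (p.1, d.getD p.2 [])) with hel
  have hnd : domains.Nodup :=
    (PySem.List.sorted_perm d.keys (fun x => x) false).nodup_iff.mpr
      (PySem.Dict.nodup_keys_ofList domain_tasks)
  -- A's side: the loop is exactly R rounds of buckets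
  have hA : pvLoopA d domains R
      (domains.foldl (fun acc dd => acc.insert dd (0 : Int)) PySem.Dict.empty) [] =
      (List.range' 0 R).flatMap (fun r' =>
        (domains.filter (fun dd => decide (r' < (d.getD dd []).length))).map
          (fun dd => PySem.List.pyGetD (d.getD dd []) (r' : Int) "")) := by
    rw [pvLoopA_closed d domains hnd R 0 _ [] (by
      intro dd _
      rw [pvGetD_init_zero _ _ (fun k => PySem.Dict.getD_empty k 0)]
      simp)]
    rfl
  -- B's decorated list is pvDec el
  have hdec : (PySem.List.enumerate domains).flatMap
      (fun rd => (PySem.List.enumerate (d.getD rd.2 [])).map (fun it => (it.1, rd.1, it.2))) =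
      pvDec el := by
    rw [hel, pvDec, List.flatMap_map]
  -- the sorted decorated list is the concatenation of the buckets
  have hsorted : PySem.List.sorted (pvDec el)
      (fun e => (toLex (e.1, e.2.1) : Lex (Int × Int))) false =
      (List.range' 0 R).flatMap (fun r => pvBucket r el) := by
    apply PySem.List.sorted_eq_of_perm_of_pairwise_lt
    · -- permutation: buckets are a rearrangement of the decorated list
      have hmapeq : (List.range' 0 R).flatMap (fun r => pvBucket r el) =
          (List.range' 0 R).flatMap (fun (r : Nat) =>
            (pvDec el).filter (fun e => decide (e.1 = (r : Int)))) := by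
        rw [List.flatMap, List.flatMap]
        exact congrArg List.flatten (List.map_congr_left (fun r _ =>
          (pvBucket_eq_filter r el).symm))
      rw [hmapeq]
      apply pvPerm_buckets
      intro e he
      obtain ⟨kl, hkl, hekl⟩ := List.mem_flatMap.mp he
      obtain ⟨it, hit, rfl⟩ := List.mem_map.mp hekl
      obtain ⟨k, hk, rfl⟩ := (PySem.List.mem_enumerate_iff kl.2 0 it).mp hit
      obtain ⟨p, hp, rfl⟩ := List.mem_map.mp hkl
      obtain ⟨j, hj, rfl⟩ := (PySem.List.mem_enumerate_iff domains 0 p).mp hp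
      refine ⟨k, ?_, by simp⟩
      calc k < (d.getD domains[j] []).length := by simpa using hk
        _ < R := pvLen_lt_fuel domains (fun dd => d.getD dd []) domains[j] (by simp)
    · -- strictly increasing in the key
      apply pvPairwise_rounds
      rw [hel, List.pairwise_map]
      exact (PySem.List.pairwise_lt_enumerate domains 0).imp (fun h => h)
  rw [hA, hdec, hsorted, List.map_flatMap]
  -- round by round, the projected bucket is A's round output
  rw [List.flatMap, List.flatMap]
  refine congrArg List.flatten (List.map_congr_left (fun r _ => ?_)).symm
  rw [pvMap_thd_bucket r el]
  have hsnd : el.map (fun kl => kl.2) = domains.map (fun dd => d.getD dd []) := by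
    rw [hel, List.map_map]
    rw [show ((fun kl : Int × List String => kl.2) ∘
        (fun p : Int × String => (p.1, d.getD p.2 []))) =
        ((fun dd => d.getD dd []) ∘ (fun p : Int × String => p.2)) from rfl]
    rw [← List.map_map, PySem.List.map_snd_enumerate]
  rw [hsnd, List.filter_map, List.map_map]
  rfl
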